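-- pv_equiv track=rewrite | github.com/becario02/quikbot | backend/app/utils/query_filter.py | decode_unicode
-- ===== SOURCE A (Python) =====
-- def decode_unicode(query: str) -> str:
--     # Mapeo de secuencias Unicode a caracteres acentuados
--     unicode_map = {
--         # Vocales minúsculas con acento
--         '\\u00e1': 'á',  # a con acento
--         '\\u00e9': 'é',  # e con acento
--         '\\u00ed': 'í',  # i con acento
--         '\\u00f3': 'ó',  # o con acento
--         '\\u00fa': 'ú',  # u con acento
--         # Vocales mayúsculas con acento
--         '\\u00c1': 'Á',  # A con acento
--         '\\u00c9': 'É',  # E con acento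
--         '\\u00cd': 'Í',  # I con acento
--         '\\u00d3': 'Ó',  # O con acento
--         '\\u00da': 'Ú',  # U con acento
--         # Ñ y ñ
--         '\\u00f1': 'ñ',  # ñ minúscula
--         '\\u00d1': 'Ñ',  # Ñ mayúscula
--         # Diéresis
--         '\\u00fc': 'ü',  # u con diéresis
--         '\\u00dc': 'Ü'   # U con diéresis
--     }
--
--     # Reemplazar cada secuencia Unicode por su carácter correspondiente
--     result = query
--     for unicode_seq, char in unicode_map.items():
--         result = result.replace(unicode_seq, char)
--
--     return result
-- ===== SOURCE B (Python) =====
-- def decode_unicode(query: str) -> str: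
--     unicode_map = {
--         '\\u00e1': 'á', '\\u00e9': 'é', '\\u00ed': 'í', '\\u00f3': 'ó', '\\u00fa': 'ú',
--         '\\u00c1': 'Á', '\\u00c9': 'É', '\\u00cd': 'Í', '\\u00d3': 'Ó', '\\u00da': 'Ú',
--         '\\u00f1': 'ñ', '\\u00d1': 'Ñ',
--         '\\u00fc': 'ü', '\\u00dc': 'Ü'
--     }
--     out = []
--     i = 0
--     n = len(query)
--     while i < n:
--         if query[i] == '\\':
--             ch = unicode_map.get(query[i:i+6])
--             if ch is not None:
--                 out.append(ch)
--                 i += 6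
--                 continue
--         out.append(query[i])
--         i += 1
--     return ''.join(out)
-- ===== Notes on version B (the rewrite author's own statement) =====
-- stated objective: alternative
-- what changed: Replaces the fourteen sequential full-string str.replace passes with a single left-to-right scan that, at each backslash, looks the 6-character window up in the map once and skips it on a hit.
import Mathlib
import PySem

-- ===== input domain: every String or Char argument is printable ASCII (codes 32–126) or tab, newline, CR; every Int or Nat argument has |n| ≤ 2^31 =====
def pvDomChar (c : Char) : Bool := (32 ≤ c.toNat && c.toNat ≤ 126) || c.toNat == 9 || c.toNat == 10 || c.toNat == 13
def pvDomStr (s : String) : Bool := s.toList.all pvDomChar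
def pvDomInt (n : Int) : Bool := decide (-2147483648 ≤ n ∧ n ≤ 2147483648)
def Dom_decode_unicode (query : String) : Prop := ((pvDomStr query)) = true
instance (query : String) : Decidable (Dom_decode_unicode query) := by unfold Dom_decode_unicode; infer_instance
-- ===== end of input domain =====

-- B replaces A's fourteen sequential full-string replace passes by one left-to-right scan
-- with a single map lookup at each backslash (objective: alternative, not claimed faster).

-- ===== PORT A =====
def decode_unicode (query : String) : String :=
  let unicode_map : PySem.Dict String String := PySem.Dict.ofList
    [("\\u00e1", "á"), ("\\u00e9", "é"), ("\\u00ed", "í"), ("\\u00f3", "ó"), ("\\u00fa", "ú"),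
     ("\\u00c1", "Á"), ("\\u00c9", "É"), ("\\u00cd", "Í"), ("\\u00d3", "Ó"), ("\\u00da", "Ú"),
     ("\\u00f1", "ñ"), ("\\u00d1", "Ñ"),
     ("\\u00fc", "ü"), ("\\u00dc", "Ü")]
  unicode_map.items.foldl (fun result p => PySem.Str.replace result p.1 p.2) query

-- ===== PORT B =====
-- the same 14-entry map, keys as 6-character lists ('\u00xy'), values the accented chars
def pvTbl : List (List Char × Char) :=
  [ (['\\','u','0','0','e','1'], 'á'), (['\\','u','0','0','e','9'], 'é'),
    (['\\','u','0','0','e','d'], 'í'), (['\\','u','0','0','f','3'], 'ó'),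
    (['\\','u','0','0','f','a'], 'ú'), (['\\','u','0','0','c','1'], 'Á'),
    (['\\','u','0','0','c','9'], 'É'), (['\\','u','0','0','c','d'], 'Í'),
    (['\\','u','0','0','d','3'], 'Ó'), (['\\','u','0','0','d','a'], 'Ú'),
    (['\\','u','0','0','f','1'], 'ñ'), (['\\','u','0','0','d','1'], 'Ñ'),
    (['\\','u','0','0','f','c'], 'ü'), (['\\','u','0','0','d','c'], 'Ü') ]

-- unicode_map.get(query[i:i+6]): first (only) match in the literal table
def pvLook : List (List Char × Char) → List Char → Option Char
  | [], _ => none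
  | (k, v) :: ps, x => if x = k then some v else pvLook ps x

-- the while loop of B: emit the mapped char and skip 6 on a hit, else copy one char
def pvScan : List Char → List Char
  | [] => []
  | c :: t =>
    match (if c = '\\' then pvLook pvTbl (c :: t.take 5) else none) with
    | some v => v :: pvScan (t.drop 5)
    | none => c :: pvScan t
termination_by l => l.length
decreasing_by
  · simp only [List.length_cons, List.length_drop]; omega
  · simp only [List.length_cons]; omega

def decode_unicode_alt (query : String) : String := String.ofList (pvScan query.toList)

-- ===== PRECONDITION & SPEC =====
def Spec_decode_unicode (query : String) (out : String) : Prop := out = decode_unicode_alt query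
instance (query : String) (out : String) : Decidable (Spec_decode_unicode query out) := by unfold Spec_decode_unicode; infer_instance

-- ===== CLAIM (what is proved, stated in full; the proofs are below) =====
def Claim_equal_decode_unicode : Prop := ∀ (query : String), Dom_decode_unicode query → Spec_decode_unicode query (decode_unicode query)

-- ===== LEMMAS AND PROOFS =====

def pvKey (a b : Char) : List Char := ['\\','u','0','0',a,b]

-- the map as ((hex1, hex2), value) triples, A's insertion order
def pvP : List ((Char × Char) × Char) :=
  [ (('e','1'),'á'), (('e','9'),'é'), (('e','d'),'í'), (('f','3'),'ó'), (('f','a'),'ú'),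
    (('c','1'),'Á'), (('c','9'),'É'), (('c','d'),'Í'), (('d','3'),'Ó'), (('d','a'),'Ú'),
    (('f','1'),'ñ'), (('d','1'),'Ñ'), (('f','c'),'ü'), (('d','c'),'Ü') ]

-- structural form of one replace pass with a 6-char pattern and 1-char replacement
def pvRep (old : List Char) (v : Char) : List Char → List Char
  | [] => []
  | c :: t => if old.isPrefixOf (c :: t) then v :: pvRep old v (t.drop 5) else c :: pvRep old v t
termination_by l => l.length
decreasing_by
  · simp only [List.length_cons, List.length_drop]; omega
  · simp only [List.length_cons]; omega

-- A's loop at the char level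
def pvComp (P : List ((Char × Char) × Char)) (l : List Char) : List Char :=
  P.foldl (fun r p => pvRep (pvKey p.1.1 p.1.2) p.2 r) l

def pvGood (P : List ((Char × Char) × Char)) : Prop :=
  ∀ p ∈ P, p.1.1 ≠ '\\' ∧ p.1.2 ≠ '\\' ∧ p.1.1.toNat ≤ 127 ∧ p.1.2.toNat ≤ 127 ∧ 127 < p.2.toNat

-- PySem.Chars.replace with a length-6 pattern and single-char replacement is pvRep
theorem pvGo_eq (old : List Char) (h6 : old.length = 6) (v : Char) :
    ∀ (fuel : Nat) (l acc : List Char), l.length ≤ fuel →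
      PySem.Chars.replace.go old [v] fuel l acc = acc.reverse ++ pvRep old v l := by
  intro fuel
  induction fuel with
  | zero =>
    intro l acc hl
    have : l = [] := List.length_eq_zero_iff.mp (Nat.le_zero.mp hl)
    subst this
    simp [PySem.Chars.replace.go, pvRep]
  | succ n ih =>
    intro l acc hl
    cases l with
    | nil => simp [PySem.Chars.replace.go, pvRep]
    | cons c t =>
      by_cases hp : old.isPrefixOf (c :: t) = true
      · have hdrop : List.drop old.length (c :: t) = t.drop 5 := by
          rw [h6]; simp
        simp only [PySem.Chars.replace.go, hp, if_true, hdrop]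
        rw [ih (t.drop 5) ([v].reverse ++ acc)
            (by simp only [List.length_drop]; simp at hl; omega)]
        simp [pvRep, hp]
      · simp only [PySem.Chars.replace.go, hp]
        rw [if_neg (by simp only [Bool.not_eq_true] at hp; simp)]
        rw [ih t (c :: acc) (by simp at hl; omega)]
        simp [pvRep, hp]

theorem pvReplace_eq (old : List Char) (h6 : old.length = 6) (v : Char) (l : List Char) :
    PySem.Chars.replace l old [v] = pvRep old v l := by
  have hne : old.isEmpty = false := by
    cases old with
    | nil => simp at h6
    | cons a t => simp
  rw [PySem.Chars.replace, hne]
  simp only [Bool.false_eq_true, if_false]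
  have := pvGo_eq old h6 v l.length l [] (le_refl _)
  simpa using this

-- push lemmas for pvRep
theorem pvRep_nil (old : List Char) (v : Char) : pvRep old v [] = [] := by simp [pvRep]

theorem pvRep_cons_ne (a b v c : Char) (t : List Char) (hc : c ≠ '\\') :
    pvRep (pvKey a b) v (c :: t) = c :: pvRep (pvKey a b) v t := by
  have : (pvKey a b).isPrefixOf (c :: t) = false := by
    simp [pvKey, List.isPrefixOf]
    intro h; exact absurd h.symm hc
  simp [pvRep, this]

theorem pvRep_miss (a b v : Char) (t : List Char) (h : t.take 5 ≠ ['u','0','0',a,b]) :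
    pvRep (pvKey a b) v ('\\' :: t) = '\\' :: pvRep (pvKey a b) v t := by
  have : (pvKey a b).isPrefixOf ('\\' :: t) = false := by
    rw [Bool.eq_false_iff]
    intro hpf
    have hpre : pvKey a b <+: '\\' :: t := by
      exact List.isPrefixOf_iff_prefix.mp hpf
    have := List.prefix_iff_eq_take.mp hpre
    have h6 : (pvKey a b).length = 6 := by simp [pvKey]
    rw [h6] at this
    simp only [List.take_succ_cons, pvKey] at this
    apply h
    exact (List.cons_eq_cons.mp this.symm).2
  simp [pvRep, this]

theorem pvRep_hit (a b v : Char) (s : List Char) :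
    pvRep (pvKey a b) v (pvKey a b ++ s) = v :: pvRep (pvKey a b) v s := by
  have hpf : (pvKey a b).isPrefixOf ('\\' :: ('u'::'0'::'0'::a::b::s)) = true :=
    List.isPrefixOf_iff_prefix.mpr ⟨s, rfl⟩
  show pvRep (pvKey a b) v ('\\' :: ('u'::'0'::'0'::a::b::s)) = _
  rw [pvRep, if_pos hpf]
  simp

theorem pvRep_other (a b v a' b' : Char) (s : List Char)
    (ha : a' ≠ '\\') (hb : b' ≠ '\\') (hne : (a', b') ≠ (a, b)) :
    pvRep (pvKey a b) v (pvKey a' b' ++ s) = pvKey a' b' ++ pvRep (pvKey a b) v s := by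
  have h0 : (pvKey a b).isPrefixOf ('\\'::'u'::'0'::'0'::a'::b'::s) = false := by
    simp [pvKey, List.isPrefixOf]
    intro h1 h2
    exact absurd (Prod.ext h1.symm h2.symm) hne
  show pvRep (pvKey a b) v ('\\'::'u'::'0'::'0'::a'::b'::s) = _
  rw [pvRep, if_neg (by simp [h0])]
  rw [pvRep_cons_ne a b v 'u' _ (by decide)]
  rw [pvRep_cons_ne a b v '0' _ (by decide)]
  rw [pvRep_cons_ne a b v '0' _ (by decide)]
  rw [pvRep_cons_ne a b v a' _ ha]
  rw [pvRep_cons_ne a b v b' _ hb]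
  simp [pvKey]

-- a replace pass either leaves the first n chars unchanged or puts its value among them
theorem pvRep_take_stable (a b v : Char) :
    ∀ (m : Nat) (t : List Char), t.length ≤ m → ∀ (n : Nat),
      (pvRep (pvKey a b) v t).take n = t.take n ∨ v ∈ (pvRep (pvKey a b) v t).take n := by
  intro m
  induction m with
  | zero =>
    intro t ht n
    have : t = [] := List.length_eq_zero_iff.mp (Nat.le_zero.mp ht)
    subst this; left; simp [pvRep_nil]
  | succ k ih =>
    intro t ht n
    cases t with
    | nil => left; simp [pvRep_nil]
    | cons c t' =>
      by_cases hp : (pvKey a b).isPrefixOf (c :: t') = true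
      · rw [pvRep, if_pos hp]
        cases n with
        | zero => left; simp
        | succ n' => right; simp
      · rw [pvRep, if_neg hp]
        cases n with
        | zero => left; simp
        | succ n' =>
          simp only [List.take_succ_cons]
          rcases ih t' (by simp at ht; omega) n' with h | h
          · left; rw [h]
          · right; exact List.mem_cons_of_mem _ h

-- fold push lemmas
theorem pvComp_nil (P : List ((Char × Char) × Char)) : pvComp P [] = [] := by
  induction P with
  | nil => rfl
  | cons p P ih => simp only [pvComp, List.foldl_cons, pvRep_nil]; exact ih

theorem pvComp_cons (P : List ((Char × Char) × Char)) (hG : pvGood P) (c : Char)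
    (hc : c ≠ '\\') : ∀ (s : List Char), pvComp P (c :: s) = c :: pvComp P s := by
  induction P with
  | nil => intro s; rfl
  | cons p P ih =>
    intro s
    simp only [pvComp, List.foldl_cons]
    rw [pvRep_cons_ne p.1.1 p.1.2 p.2 c s hc]
    exact ih (fun q hq => hG q (List.mem_cons_of_mem _ hq)) (pvRep (pvKey p.1.1 p.1.2) p.2 s)

theorem pvComp_hit (P : List ((Char × Char) × Char)) (hG : pvGood P)
    (hD : P.Pairwise (fun p q => p.1 ≠ q.1)) (a b v : Char) (hm : ((a, b), v) ∈ P) :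
    ∀ (s : List Char), pvComp P (pvKey a b ++ s) = v :: pvComp P s := by
  induction P with
  | nil => cases hm
  | cons p P ih =>
    intro s
    rcases List.mem_cons.mp hm with heq | hmem
    · -- the head entry is the matched key
      subst heq
      simp only [pvComp, List.foldl_cons]
      rw [pvRep_hit a b v s]
      have hv : v ≠ '\\' := by
        have := (hG _ (List.mem_cons_self)).2.2.2.2
        intro h; subst h; simp [Char.toNat] at this
      exact pvComp_cons P (fun q hq => hG q (List.mem_cons_of_mem _ hq)) v hv _
    · -- the head entry is a different key: it passes the segment through
      have hpq : p.1 ≠ (a, b) := (List.pairwise_cons.mp hD).1 _ hmem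
      have hne : (a, b) ≠ (p.1.1, p.1.2) := fun h => hpq h.symm
      have hGab := hG _ (List.mem_cons_of_mem _ hmem)
      simp only [pvComp, List.foldl_cons]
      rw [pvRep_other p.1.1 p.1.2 p.2 a b s hGab.1 hGab.2.1 hne]
      exact ih (fun q hq => hG q (List.mem_cons_of_mem _ hq))
        (List.pairwise_cons.mp hD).2 hmem _

theorem pvComp_miss (P : List ((Char × Char) × Char)) (hG : pvGood P) :
    ∀ (t : List Char), (∀ p ∈ P, t.take 5 ≠ ['u','0','0',p.1.1,p.1.2]) →
      pvComp P ('\\' :: t) = '\\' :: pvComp P t := by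
  induction P with
  | nil => intro t _; rfl
  | cons p P ih =>
    intro t h
    simp only [pvComp, List.foldl_cons]
    rw [pvRep_miss p.1.1 p.1.2 p.2 t (h p List.mem_cons_self)]
    refine ih (fun q hq => hG q (List.mem_cons_of_mem _ hq)) _ ?_
    intro q hq
    rcases pvRep_take_stable p.1.1 p.1.2 p.2 t.length t (le_refl _) 5 with hst | hmem
    · rw [hst]; exact h q (List.mem_cons_of_mem _ hq)
    · -- the value (non-ASCII) sits in the first 5 chars: cannot equal an all-ASCII key tail
      intro heq
      rw [heq] at hmem
      have hGp := hG p List.mem_cons_self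
      have hGq := hG q (List.mem_cons_of_mem _ hq)
      simp only [List.mem_cons, List.not_mem_nil, or_false] at hmem
      have h127 := hGp.2.2.2.2
      have hq1 := hGq.2.2.1
      have hq2 := hGq.2.2.2.1
      rcases hmem with h | h | h | h | h
      · rw [h] at h127; exact absurd h127 (by decide)
      · rw [h] at h127; exact absurd h127 (by decide)
      · rw [h] at h127; exact absurd h127 (by decide)
      · rw [h] at h127; omega
      · rw [h] at h127; omega

-- lookup lemmas for the literal table
theorem pvLook_map_some (P : List ((Char × Char) × Char)) (x : List Char) (v : Char)
    (h : pvLook (P.map fun p => (pvKey p.1.1 p.1.2, p.2)) x = some v) :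
    ∃ a b, ((a, b), v) ∈ P ∧ x = pvKey a b := by
  induction P with
  | nil => cases h
  | cons p P ih =>
    simp only [List.map_cons, pvLook] at h
    split at h
    · rename_i hx
      refine ⟨p.1.1, p.1.2, ?_, hx⟩
      cases Option.some.inj h
      exact List.mem_cons.mpr (Or.inl rfl)
    · rcases ih h with ⟨a, b, hm, hx⟩
      exact ⟨a, b, List.mem_cons_of_mem _ hm, hx⟩

theorem pvLook_map_none (P : List ((Char × Char) × Char)) (x : List Char)
    (h : pvLook (P.map fun p => (pvKey p.1.1 p.1.2, p.2)) x = none) :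
    ∀ p ∈ P, x ≠ pvKey p.1.1 p.1.2 := by
  induction P with
  | nil => intro p hp; cases hp
  | cons p P ih =>
    simp only [List.map_cons, pvLook] at h
    split at h
    · cases h
    · rename_i hx
      intro q hq
      rcases List.mem_cons.mp hq with heq | hmem
      · subst heq; exact hx
      · exact ih h q hmem

theorem pvTbl_eq : pvTbl = pvP.map fun p => (pvKey p.1.1 p.1.2, p.2) := by decide

theorem pvP_good : pvGood pvP := by unfold pvGood; decide

theorem pvP_distinct : pvP.Pairwise (fun p q => p.1 ≠ q.1) := by decide

-- the heart: A's 14 replace passes equal B's single scan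
theorem pvMain : ∀ (m : Nat) (l : List Char), l.length ≤ m → pvComp pvP l = pvScan l := by
  intro m
  induction m with
  | zero =>
    intro l hl
    have : l = [] := List.length_eq_zero_iff.mp (Nat.le_zero.mp hl)
    subst this
    rw [pvComp_nil, pvScan]
  | succ k ih =>
    intro l hl
    cases l with
    | nil => rw [pvComp_nil, pvScan]
    | cons c t =>
      by_cases hc : c = '\\'
      · subst hc
        cases hlk : pvLook pvTbl ('\\' :: t.take 5) with
        | some v =>
          have hlk2 := hlk
          rw [pvTbl_eq] at hlk2
          rcases pvLook_map_some pvP _ v hlk2 with ⟨a, b, hm, hx⟩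
          have htk : t.take 5 = ['u','0','0',a,b] := by
            have := List.cons_eq_cons.mp hx
            exact this.2
          have hsplit : '\\' :: t = pvKey a b ++ t.drop 5 := by
            conv_lhs => rw [← List.take_append_drop 5 t]
            rw [htk]; rfl
          have hL : pvComp pvP ('\\' :: t) = v :: pvComp pvP (t.drop 5) := by
            rw [hsplit]; exact pvComp_hit pvP pvP_good pvP_distinct a b v hm _
          have hR : pvScan ('\\' :: t) = v :: pvScan (t.drop 5) := by
            rw [pvScan, if_pos rfl, hlk]
          have ht5 : (t.drop 5).length ≤ k := by
            simp only [List.length_drop]; simp at hl; omega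
          rw [hL, hR, ih (t.drop 5) ht5]
        | none =>
          have hR : pvScan ('\\' :: t) = '\\' :: pvScan t := by
            rw [pvScan, if_pos rfl, hlk]
          rw [hR]
          rw [pvComp_miss pvP pvP_good t ?hmiss]
          · rw [ih t (by simp at hl; omega)]
          case hmiss =>
            intro p hp heq
            have hlk2 := hlk
            rw [pvTbl_eq] at hlk2
            have := pvLook_map_none pvP _ hlk2 p hp
            apply this
            rw [pvKey, heq]
      · rw [pvComp_cons pvP pvP_good c hc t]
        rw [pvScan]
        rw [if_neg hc]
        rw [ih t (by simp at hl; omega)]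

-- bridge: A's String-level fold, through toList, is pvComp
theorem pvFold_toList (P : List ((Char × Char) × Char)) :
    ∀ (q : String),
      ((P.map fun p => (String.ofList (pvKey p.1.1 p.1.2), String.ofList [p.2])).foldl
        (fun r p => PySem.Str.replace r p.1 p.2) q).toList = pvComp P q.toList := by
  induction P with
  | nil => intro q; rfl
  | cons p P ih =>
    intro q
    simp only [List.map_cons, List.foldl_cons, pvComp]
    have : (PySem.Str.replace q (String.ofList (pvKey p.1.1 p.1.2)) (String.ofList [p.2])).toList
        = pvRep (pvKey p.1.1 p.1.2) p.2 q.toList := by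
      rw [PySem.Str.toList_replace]
      simp only [String.toList_ofList]
      exact pvReplace_eq _ (by simp [pvKey]) _ _
    have h2 := ih (PySem.Str.replace q (String.ofList (pvKey p.1.1 p.1.2)) (String.ofList [p.2]))
    simp only [pvComp] at h2
    rw [h2, this]

theorem pvItems_eq :
    (PySem.Dict.ofList
      ([("\\u00e1", "á"), ("\\u00e9", "é"), ("\\u00ed", "í"), ("\\u00f3", "ó"), ("\\u00fa", "ú"),
        ("\\u00c1", "Á"), ("\\u00c9", "É"), ("\\u00cd", "Í"), ("\\u00d3", "Ó"), ("\\u00da", "Ú"),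
        ("\\u00f1", "ñ"), ("\\u00d1", "Ñ"),
        ("\\u00fc", "ü"), ("\\u00dc", "Ü")] : List (String × String))).items
      = pvP.map fun p => (String.ofList (pvKey p.1.1 p.1.2), String.ofList [p.2]) := by decide

theorem pvA_toList (q : String) : (decode_unicode q).toList = pvComp pvP q.toList := by
  show ((PySem.Dict.ofList _).items.foldl (fun r p => PySem.Str.replace r p.1 p.2) q).toList = _
  rw [pvItems_eq]
  exact pvFold_toList pvP q

-- ===== VERDICT (by name: the statement is the Claim_ definition above) =====
theorem decode_unicode_spec : Claim_equal_decode_unicode := by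
  intro query _
  unfold Spec_decode_unicode decode_unicode_alt
  have h1 : (decode_unicode query).toList = pvScan query.toList := by
    rw [pvA_toList, pvMain query.toList.length query.toList (le_refl _)]
  rw [← h1]
  exact String.ofList_toList.symm
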